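-- pv_equiv track=rewrite | github.com/grapheneaffiliate/h4-polytopic-attention | solve_arc_b7.py | solve_54d9e175
-- ===== SOURCE A (Python) =====
-- def solve_54d9e175(grid):
--     h, w = len(grid), len(grid[0])
--     out = [row[:] for row in grid]
--
--     # The grid is divided by 5-separators into sections
--     # Find separator rows and columns
--     sep_rows = []
--     sep_cols = []
--
--     for r in range(h):
--         if all(grid[r][c] == 5 for c in range(w)):
--             sep_rows.append(r)
--
--     for c in range(w):
--         if all(grid[r][c] == 5 for r in range(h)):
--             sep_cols.append(c)
--
--     # Define sections as regions between separators
--     row_ranges = []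
--     prev = 0
--     for sr in sep_rows:
--         if sr > prev:
--             row_ranges.append((prev, sr))
--         prev = sr + 1
--     if prev < h:
--         row_ranges.append((prev, h))
--
--     col_ranges = []
--     prev = 0
--     for sc in sep_cols:
--         if sc > prev:
--             col_ranges.append((prev, sc))
--         prev = sc + 1
--     if prev < w:
--         col_ranges.append((prev, w))
--
--     # For each section, find the center color and fill with color + 5
--     for r_start, r_end in row_ranges:
--         for c_start, c_end in col_ranges:
--             # Find the non-zero, non-5 color in this section
--             center_color = 0
--             for r in range(r_start, r_end):
--                 for c in range(c_start, c_end):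
--                     if grid[r][c] != 0 and grid[r][c] != 5:
--                         center_color = grid[r][c]
--                         break
--                 if center_color != 0:
--                     break
--
--             if center_color != 0:
--                 fill_color = center_color + 5
--                 for r in range(r_start, r_end):
--                     for c in range(c_start, c_end):
--                         if grid[r][c] != 5:
--                             out[r][c] = fill_color
--
--     return out
-- ===== SOURCE B (Python) =====
-- def solve_54d9e175(grid):
--     h, w = len(grid), len(grid[0])
--     seprow = [all(grid[r][c] == 5 for c in range(w)) for r in range(h)]
--     sepcol = [all(grid[r][c] == 5 for r in range(h)) for c in range(w)]
--
--     def starts(flags):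
--         res, a = [], 0
--         for i, f in enumerate(flags):
--             if f:
--                 res.append(None)
--                 a = i + 1
--             else:
--                 res.append(a)
--         return res
--
--     rstart, cstart = starts(seprow), starts(sepcol)
--
--     first = {}
--     for r in range(h):
--         if rstart[r] is None:
--             continue
--         for c in range(w):
--             if cstart[c] is None:
--                 continue
--             v = grid[r][c]
--             if v != 0 and v != 5 and (rstart[r], cstart[c]) not in first:
--                 first[(rstart[r], cstart[c])] = v
--
--     out = []
--     for r in range(h):
--         row = grid[r]
--         if rstart[r] is None:
--             out.append(list(row))
--         else:
--             out.append([
--                 first[(rstart[r], cstart[c])] + 5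
--                 if c < w and cstart[c] is not None and v != 5
--                    and (rstart[r], cstart[c]) in first
--                 else v
--                 for c, v in enumerate(row)
--             ])
--     return out
-- ===== Notes on version B (the rewrite author's own statement) =====
-- stated objective: alternative
-- what changed: Replaces A's separator-range lists and per-section double-scan-then-fill (mutating nested loops over sections) by a table-driven design: a single sweep computes each row's/column's block-start label, one row-major pass records the first non-0/non-5 color per (row-start, col-start) section key in a dict, and the output is built as a pure per-cell map looking up that dict.
import Mathlib
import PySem

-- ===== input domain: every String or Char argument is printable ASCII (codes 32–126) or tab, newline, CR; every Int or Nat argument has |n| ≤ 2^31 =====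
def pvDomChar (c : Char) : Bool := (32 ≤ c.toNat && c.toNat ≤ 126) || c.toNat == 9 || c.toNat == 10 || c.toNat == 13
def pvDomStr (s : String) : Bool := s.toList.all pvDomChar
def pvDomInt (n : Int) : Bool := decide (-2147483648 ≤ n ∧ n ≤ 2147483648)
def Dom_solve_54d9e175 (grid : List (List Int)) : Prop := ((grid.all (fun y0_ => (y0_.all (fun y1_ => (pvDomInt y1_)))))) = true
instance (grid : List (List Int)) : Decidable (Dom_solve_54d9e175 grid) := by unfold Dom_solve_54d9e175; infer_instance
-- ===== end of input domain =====

-- B replaces A's separator-range lists and per-section scan-and-fill by block-start labels,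
-- one row-major dict pass recording each section's first non-0/non-5 color, and a pure per-cell map.

-- shared cell accessor (grid[r][c]; in-range inside Pre_)
def pvG (grid : List (List Int)) (r c : Nat) : Int := (grid.getD r []).getD c 0

-- ===== PORT A =====
def pvSepRowA (grid : List (List Int)) (w r : Nat) : Bool :=
  (List.range w).all (fun c => pvG grid r c == 5)

def pvSepColA (grid : List (List Int)) (h c : Nat) : Bool :=
  (List.range h).all (fun r => pvG grid r c == 5)

-- A's "row_ranges"/"col_ranges" loop (prev accumulator)
def pvRangesA (seps : List Nat) (n : Nat) : List (Nat × Nat) :=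
  let p := seps.foldl
    (fun (p : List (Nat × Nat) × Nat) sr =>
      (if p.2 < sr then p.1 ++ [(p.2, sr)] else p.1, sr + 1))
    ([], 0)
  if p.2 < n then p.1 ++ [(p.2, n)] else p.1

-- A's center-color double loop with break (the found value is ≠ 0, so "keep once nonzero" is the break)
def pvCenterA (grid : List (List Int)) (rs re cs ce : Nat) : Int :=
  (List.range' rs (re - rs)).foldl
    (fun acc r =>
      if acc != 0 then acc
      else (List.range' cs (ce - cs)).foldl
        (fun acc c =>
          if acc != 0 then acc
          else if pvG grid r c != 0 && pvG grid r c != 5 then pvG grid r c else acc)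
        acc)
    0

-- out[r][c] = v
def pvSet2 (out : List (List Int)) (r c : Nat) (v : Int) : List (List Int) :=
  out.set r ((out.getD r []).set c v)

def pvFillA (grid : List (List Int)) (rs re cs ce : Nat) (f : Int) (out : List (List Int)) : List (List Int) :=
  (List.range' rs (re - rs)).foldl
    (fun out r =>
      (List.range' cs (ce - cs)).foldl
        (fun out c => if pvG grid r c != 5 then pvSet2 out r c f else out)
        out)
    out

def solve_54d9e175 (grid : List (List Int)) : List (List Int) :=
  let h := grid.length
  let w := (grid.getD 0 []).length
  let out := grid.map (fun row => row)
  let sepRows := (List.range h).filter (fun r => pvSepRowA grid w r)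
  let sepCols := (List.range w).filter (fun c => pvSepColA grid h c)
  let rowRanges := pvRangesA sepRows h
  let colRanges := pvRangesA sepCols w
  rowRanges.foldl
    (fun out rr =>
      colRanges.foldl
        (fun out cr =>
          let center := pvCenterA grid rr.1 rr.2 cr.1 cr.2
          if center != 0 then pvFillA grid rr.1 rr.2 cr.1 cr.2 (center + 5) out else out)
        out)
    out

-- ===== PORT B =====
-- B's single sweep computing each index's block start (None on a separator line)
def pvStarts (flags : List Bool) : List (Option Nat) :=
  ((List.range flags.length).foldl
    (fun (p : List (Option Nat) × Nat) i =>
      if flags.getD i false then (p.1 ++ [none], i + 1) else (p.1 ++ [some p.2], p.2))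
    ([], 0)).1

-- B's first row-major pass: first non-0/non-5 color per section key (rowstart, colstart)
def pvFirst (grid : List (List Int)) (h w : Nat) (rst cst : List (Option Nat)) : PySem.Dict (Nat × Nat) Int :=
  (List.range h).foldl
    (fun d r =>
      match rst.getD r none with
      | none => d
      | some a =>
        (List.range w).foldl
          (fun d c =>
            match cst.getD c none with
            | none => d
            | some b =>
              if pvG grid r c != 0 && pvG grid r c != 5 && (d.get? (a, b)).isNone
              then d.insert (a, b) (pvG grid r c) else d)
          d)
    PySem.Dict.empty

def solve_54d9e175_alt (grid : List (List Int)) : List (List Int) :=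
  let h := grid.length
  let w := (grid.getD 0 []).length
  let seprow := (List.range h).map (fun r => (List.range w).all (fun c => pvG grid r c == 5))
  let sepcol := (List.range w).map (fun c => (List.range h).all (fun r => pvG grid r c == 5))
  let rst := pvStarts seprow
  let cst := pvStarts sepcol
  let first := pvFirst grid h w rst cst
  (List.range h).foldl
    (fun out r =>
      let row := grid.getD r []
      match rst.getD r none with
      | none => out ++ [row.map (fun v => v)]
      | some a =>
        out ++ [(PySem.List.enumerate row).map
          (fun p =>
            if p.1 < (w : Int) then
              match cst.getD p.1.toNat none with
              | none => p.2
              | some b =>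
                if p.2 != 5 then
                  match first.get? (a, b) with
                  | some col => col + 5
                  | none => p.2
                else p.2
            else p.2)])
    []

-- ===== PRECONDITION & SPEC =====
-- Pre_ excludes exactly the inputs on which A raises IndexError: the empty grid (grid[0])
-- and grids where some row is shorter than the first row (grid[r][c] for c < len(grid[0])).
def Pre_solve_54d9e175 (grid : List (List Int)) : Prop :=
  grid ≠ [] ∧ ∀ row ∈ grid, (grid.headD []).length ≤ row.length

instance (grid : List (List Int)) : Decidable (Pre_solve_54d9e175 grid) := by
  unfold Pre_solve_54d9e175; infer_instance

def pvWitness_solve_54d9e175 : List (List Int) :=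
  [[1, 0, 5, 0, 0], [0, 0, 5, 0, 2], [5, 5, 5, 5, 5], [0, 3, 5, 0, 0]]

def Spec_solve_54d9e175 (grid : List (List Int)) (out : List (List Int)) : Prop := out = solve_54d9e175_alt grid
instance (grid : List (List Int)) (out : List (List Int)) : Decidable (Spec_solve_54d9e175 grid out) := by unfold Spec_solve_54d9e175; infer_instance

-- ===== CLAIM (what is proved, stated in full; the proofs are below) =====
def Claim_equal_solve_54d9e175 : Prop := ∀ (grid : List (List Int)), Dom_solve_54d9e175 grid → Pre_solve_54d9e175 grid → Spec_solve_54d9e175 grid (solve_54d9e175 grid)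

-- ===== LEMMAS AND PROOFS =====

-- ---------- proof-side recursive versions of A's helpers ----------

def pvMkRanges (prev : Nat) (seps : List Nat) (n : Nat) : List (Nat × Nat) :=
  match seps with
  | [] => if prev < n then [(prev, n)] else []
  | s :: rest => (if prev < s then [(prev, s)] else []) ++ pvMkRanges (s + 1) rest n

def pvBS (F : Nat → Bool) : Nat → Nat
  | 0 => 0
  | r + 1 => if F r then r + 1 else pvBS F r

lemma pvRangesA_aux (n : Nat) : ∀ (seps : List Nat) (acc : List (Nat × Nat)) (prev : Nat),
    (let p := seps.foldl (fun (p : List (Nat × Nat) × Nat) sr =>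
        (if p.2 < sr then p.1 ++ [(p.2, sr)] else p.1, sr + 1)) (acc, prev);
     if p.2 < n then p.1 ++ [(p.2, n)] else p.1) = acc ++ pvMkRanges prev seps n
  | [], acc, prev => by
      simp only [List.foldl_nil, pvMkRanges]
      split <;> simp
  | s :: rest, acc, prev => by
      simp only [List.foldl_cons, pvMkRanges]
      by_cases h : prev < s <;>
        simp only [h, if_pos, if_neg, not_false_iff] <;>
        rw [pvRangesA_aux n rest _ (s + 1)] <;> simp [List.append_assoc]

lemma pvRangesA_eq (seps : List Nat) (n : Nat) :
    pvRangesA seps n = pvMkRanges 0 seps n := by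
  have := pvRangesA_aux n seps [] 0
  simpa [pvRangesA] using this

-- ---------- generic fold lemmas ----------

lemma foldl_pres {α β : Type} (g : α → Nat) (step : α → β → α)
    (h : ∀ a b, g (step a b) = g a) : ∀ (l : List β) (a : α), g (l.foldl step a) = g a
  | [], a => rfl
  | x :: xs, a => by rw [List.foldl_cons, foldl_pres g step h xs, h]

lemma foldl_flatMap {α β γ : Type} (g : β → List γ) (f : α → γ → α) :
    ∀ (xs : List β) (a : α), (xs.flatMap g).foldl f a = xs.foldl (fun a x => (g x).foldl f a) a
  | [], a => rfl
  | x :: xs, a => by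
      rw [List.flatMap_cons, List.foldl_append, List.foldl_cons, foldl_flatMap g f xs]

lemma find?_eq_head_filter {α : Type} (p : α → Bool) :
    ∀ (l : List α), l.find? p = (l.filter p).head?
  | [] => rfl
  | x :: xs => by
      by_cases h : p x
      · rw [List.find?_cons_of_pos h, List.filter_cons_of_pos h, List.head?_cons]
      · rw [List.find?_cons_of_neg (by simpa using h), List.filter_cons_of_neg (by simpa using h),
          find?_eq_head_filter p xs]

-- the "keep once nonzero" scan step
def pvScanStep {β : Type} (q : β → Bool) (val : β → Int) (acc : Int) (x : β) : Int :=
  if acc != 0 then acc else if q x then val x else acc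

lemma foldl_scan_keep {β : Type} (q : β → Bool) (val : β → Int) :
    ∀ (l : List β) (acc : Int), acc ≠ 0 → l.foldl (pvScanStep q val) acc = acc
  | [], acc, _ => rfl
  | x :: xs, acc, h => by
      rw [List.foldl_cons]
      have : pvScanStep q val acc x = acc := by simp [pvScanStep, h]
      rw [this, foldl_scan_keep q val xs acc h]

lemma foldl_scan_eq_find {β : Type} (q : β → Bool) (val : β → Int) :
    ∀ (l : List β), (∀ x ∈ l, q x = true → val x ≠ 0) →
      l.foldl (pvScanStep q val) 0 = (((l.find? q).map val).getD 0)
  | [], _ => rfl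
  | x :: xs, h => by
      rw [List.foldl_cons]
      by_cases hq : q x
      · have hv : val x ≠ 0 := h x (List.mem_cons_self) hq
        have : pvScanStep q val 0 x = val x := by simp [pvScanStep, hq]
        rw [this, foldl_scan_keep q val xs _ hv, List.find?_cons_of_pos hq]
        simp
      · have : pvScanStep q val 0 x = 0 := by simp [pvScanStep, hq]
        rw [this, List.find?_cons_of_neg (by simpa using hq),
          foldl_scan_eq_find q val xs (fun y hy => h y (List.mem_cons_of_mem _ hy))]

-- ---------- dict first-insert lemma ----------

lemma dict_foldl_first {β : Type} (q : β → Bool) (key : β → Nat × Nat) (val : β → Int) :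
    ∀ (xs : List β) (d : PySem.Dict (Nat × Nat) Int) (k : Nat × Nat),
      (xs.foldl (fun d x => if q x && (d.get? (key x)).isNone then d.insert (key x) (val x) else d) d).get? k
        = ((d.get? k).or (((xs.filter (fun x => q x && (key x == k))).head?).map val))
  | [], d, k => by simp
  | x :: xs, d, k => by
      rw [List.foldl_cons]
      by_cases hq : q x
      · cases hdx : d.get? (key x) with
        | none =>
          have hstep : (if q x && (none : Option Int).isNone then d.insert (key x) (val x) else d)
              = d.insert (key x) (val x) := by simp [hq]
          rw [hstep, dict_foldl_first q key val xs _ k]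
          by_cases hk : key x = k
          · subst hk
            rw [List.filter_cons_of_pos (by simp [hq])]
            rw [PySem.Dict.get?_insert_self]
            simp [hdx]
          · rw [List.filter_cons_of_neg (by simp [hq, hk]), PySem.Dict.get?_insert]
            rw [if_neg (Ne.symm hk)]
        | some v =>
          have hstep : (if q x && (some v : Option Int).isNone then d.insert (key x) (val x) else d) = d := by
            simp
          rw [hstep, dict_foldl_first q key val xs d k]
          by_cases hk : key x = k
          · subst hk
            rw [hdx, List.filter_cons_of_pos (by simp [hq])]
            simp
          · rw [List.filter_cons_of_neg (by simp [hq, hk])]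
      · have hstep : (if q x && (d.get? (key x)).isNone then d.insert (key x) (val x) else d) = d := by
          simp [hq]
        rw [hstep, dict_foldl_first q key val xs d k,
          List.filter_cons_of_neg (by simp [hq])]

-- ---------- pvStarts characterization ----------

lemma pvStarts_foldl_aux (flags : List Bool) :
    ∀ (m : Nat),
      (List.range m).foldl
        (fun (p : List (Option Nat) × Nat) i =>
          if flags.getD i false then (p.1 ++ [none], i + 1) else (p.1 ++ [some p.2], p.2))
        ([], 0)
      = ((List.range m).map
          (fun r => if flags.getD r false then none
                    else some (pvBS (fun i => flags.getD i false) r)),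
         pvBS (fun i => flags.getD i false) m)
  | 0 => rfl
  | m + 1 => by
      rw [List.range_succ, List.foldl_append, List.map_append, pvStarts_foldl_aux flags m]
      by_cases h : flags.getD m false = true <;> simp only [List.getD] at h <;> simp [h, pvBS]

lemma pvStarts_spec (flags : List Bool) :
    pvStarts flags = (List.range flags.length).map
      (fun r => if flags.getD r false then none
                else some (pvBS (fun i => flags.getD i false) r)) := by
  rw [pvStarts, pvStarts_foldl_aux flags flags.length]

lemma pvBS_congr (F G : Nat → Bool) : ∀ (r : Nat), (∀ i, i < r → F i = G i) → pvBS F r = pvBS G r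
  | 0, _ => rfl
  | r + 1, h => by
      rw [pvBS, pvBS, h r (Nat.lt_succ_self r),
        pvBS_congr F G r (fun i hi => h i (Nat.lt_succ_of_lt hi))]

-- ---------- pvBS lemmas ----------

lemma pvBS_le (F : Nat → Bool) : ∀ (r : Nat), pvBS F r ≤ r
  | 0 => Nat.le_refl 0
  | r + 1 => by
      rw [pvBS]; split
      · exact Nat.le_refl _
      · exact Nat.le_succ_of_le (pvBS_le F r)

lemma pvBS_sep_lt (F : Nat → Bool) {s : Nat} (hF : F s = true) :
    ∀ {r : Nat}, s < r → s + 1 ≤ pvBS F r := by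
  intro r
  induction r with
  | zero => omega
  | succ t ih =>
    intro h
    rw [pvBS]
    rcases Nat.lt_succ_iff_lt_or_eq.mp h with h' | h'
    · have := ih h'
      split <;> omega
    · subst h'; rw [hF]; simp
    
lemma pvBS_le_of (F : Nat → Bool) {a : Nat} :
    ∀ {r : Nat}, a ≤ r → (∀ x, a ≤ x → x < r → F x = false) → pvBS F r ≤ a := by
  intro r
  induction r with
  | zero => intro h _; have h0 : pvBS F 0 = 0 := rfl; omega
  | succ t ih =>
    intro ha hno
    rcases Nat.lt_or_ge a (t + 1) with h' | h'
    · have hat : a ≤ t := by omega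
      have hFt : F t = false := hno t hat (Nat.lt_succ_self t)
      rw [pvBS, hFt]
      simp only [Bool.false_eq_true, if_false]
      exact ih hat (fun x hx hxt => hno x hx (Nat.lt_succ_of_lt hxt))
    · have : a = t + 1 := by omega
      subst this
      exact pvBS_le F (t + 1)

lemma pvBS_ge (F : Nat → Bool) {a r : Nat} (ha : a ≤ r)
    (h0 : a = 0 ∨ (0 < a ∧ F (a - 1) = true)) : a ≤ pvBS F r := by
  rcases h0 with h | ⟨hpos, hF⟩
  · omega
  · have h1 : a - 1 < r := by omega
    have := pvBS_sep_lt F hF h1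
    omega

-- ---------- pvMkRanges structure ----------

lemma mk_bounds (n : Nat) :
    ∀ (seps : List Nat) (prev : Nat), seps.Pairwise (· < ·) →
      (∀ s ∈ seps, prev ≤ s ∧ s < n) →
      ∀ ab ∈ pvMkRanges prev seps n, prev ≤ ab.1 ∧ ab.1 < ab.2 ∧ ab.2 ≤ n
  | [], prev, _, _ => by
      intro ab hab
      rw [pvMkRanges] at hab
      split at hab
      · simp at hab; subst hab; simp; omega
      · simp at hab
  | s :: rest, prev, hp, hb => by
      intro ab hab
      rw [pvMkRanges] at hab
      rcases List.mem_append.mp hab with h | h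
      · split at h
        · simp at h; subst h
          have := hb s (by simp)
          simp; omega
        · simp at h
      · have hgt := (List.pairwise_cons.mp hp).1
        have hb' : ∀ t ∈ rest, s + 1 ≤ t ∧ t < n := by
          intro t ht
          have h1 := hb t (by simp [ht])
          have h2 := hgt t ht
          omega
        have := mk_bounds n rest (s + 1) (List.pairwise_cons.mp hp).2 hb' ab h
        have hs := hb s (by simp)
        omega

lemma mk_noF (n : Nat) (F : Nat → Bool) :
    ∀ (seps : List Nat) (prev : Nat), seps.Pairwise (· < ·) →
      (∀ s ∈ seps, prev ≤ s ∧ s < n) →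
      (∀ x, prev ≤ x → x < n → (x ∈ seps ↔ F x = true)) →
      ∀ ab ∈ pvMkRanges prev seps n, ∀ x, ab.1 ≤ x → x < ab.2 → F x = false
  | [], prev, _, _, hmem => by
      intro ab hab x h1 h2
      rw [pvMkRanges] at hab
      split at hab
      · simp at hab; subst hab
        simp at h1 h2
        by_contra hF
        have := (hmem x (by omega) (by omega)).mpr (by simpa using hF)
        simp at this
      · simp at hab
  | s :: rest, prev, hp, hb, hmem => by
      intro ab hab x h1 h2
      rw [pvMkRanges] at hab
      rcases List.mem_append.mp hab with h | h
      · split at h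
        · simp at h; subst h
          simp at h1 h2
          by_contra hF
          have hx : x ∈ s :: rest := (hmem x (by omega) (by
            have := hb s (by simp); omega)).mpr (by simpa using hF)
          rcases List.mem_cons.mp hx with h' | h'
          · omega
          · have := (List.pairwise_cons.mp hp).1 x h'
            omega
        · simp at h
      · have hp' := (List.pairwise_cons.mp hp).2
        have hgt := (List.pairwise_cons.mp hp).1
        have hb' : ∀ t ∈ rest, s + 1 ≤ t ∧ t < n := by
          intro t ht
          have := hb t (by simp [ht])
          have := hgt t ht
          omega
        have hmem' : ∀ y, s + 1 ≤ y → y < n → (y ∈ rest ↔ F y = true) := by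
          intro y hy1 hy2
          have := hmem y (by have := hb s (by simp); omega) hy2
          rw [← this]
          simp only [List.mem_cons]
          constructor
          · intro hy; right; exact hy
          · rintro (h' | h')
            · omega
            · exact h'
        exact mk_noF n F rest (s + 1) hp' hb' hmem' ab h x h1 h2

lemma mk_left (n : Nat) (F : Nat → Bool) :
    ∀ (seps : List Nat) (prev : Nat), (∀ s ∈ seps, F s = true) →
      (prev = 0 ∨ (0 < prev ∧ F (prev - 1) = true)) →
      ∀ ab ∈ pvMkRanges prev seps n, ab.1 = 0 ∨ (0 < ab.1 ∧ F (ab.1 - 1) = true)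
  | [], prev, _, h0 => by
      intro ab hab
      rw [pvMkRanges] at hab
      split at hab
      · simp at hab; subst hab; exact h0
      · simp at hab
  | s :: rest, prev, hF, h0 => by
      intro ab hab
      rw [pvMkRanges] at hab
      rcases List.mem_append.mp hab with h | h
      · split at h
        · simp at h; subst h; exact h0
        · simp at h
      · exact mk_left n F rest (s + 1) (fun t ht => hF t (by simp [ht]))
          (Or.inr ⟨Nat.succ_pos s, by simpa using hF s (by simp)⟩) ab h

lemma mk_cover (n : Nat) (F : Nat → Bool) :
    ∀ (seps : List Nat) (prev : Nat), seps.Pairwise (· < ·) →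
      (∀ s ∈ seps, prev ≤ s ∧ s < n) →
      (∀ x, prev ≤ x → x < n → (x ∈ seps ↔ F x = true)) →
      ∀ r, prev ≤ r → r < n → F r = false →
        ∃ ab ∈ pvMkRanges prev seps n, ab.1 ≤ r ∧ r < ab.2
  | [], prev, _, _, _ => by
      intro r h1 h2 _
      refine ⟨(prev, n), ?_, by simp; omega⟩
      rw [pvMkRanges]
      simp only [if_pos (by omega : prev < n)]
      simp
  | s :: rest, prev, hp, hb, hmem => by
      intro r h1 h2 hF
      have hs := hb s (by simp)
      rcases Nat.lt_trichotomy r s with h | h | h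
      · refine ⟨(prev, s), ?_, by simp; omega⟩
        rw [pvMkRanges]
        simp only [if_pos (by omega : prev < s)]
        simp
      · subst h
        have : r ∈ r :: rest := List.mem_cons_self
        have := (hmem r h1 h2).mp this
        rw [hF] at this; simp at this
      · have hp' := (List.pairwise_cons.mp hp).2
        have hgt := (List.pairwise_cons.mp hp).1
        have hb' : ∀ t ∈ rest, s + 1 ≤ t ∧ t < n := by
          intro t ht
          have := hb t (by simp [ht]); have := hgt t ht; omega
        have hmem' : ∀ y, s + 1 ≤ y → y < n → (y ∈ rest ↔ F y = true) := by
          intro y hy1 hy2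
          rw [← hmem y (by omega) hy2]
          simp only [List.mem_cons]
          constructor
          · intro hy; right; exact hy
          · rintro (h' | h')
            · omega
            · exact h'
        obtain ⟨ab, hab, hcont⟩ := mk_cover n F rest (s + 1) hp' hb' hmem' r (by omega) h2 hF
        refine ⟨ab, ?_, hcont⟩
        rw [pvMkRanges]
        exact List.mem_append_right _ hab

lemma mk_pairwise (n : Nat) :
    ∀ (seps : List Nat) (prev : Nat), seps.Pairwise (· < ·) →
      (∀ s ∈ seps, prev ≤ s ∧ s < n) →
      (pvMkRanges prev seps n).Pairwise (fun I J => I.2 ≤ J.1)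
  | [], prev, _, _ => by
      rw [pvMkRanges]; split <;> simp
  | s :: rest, prev, hp, hb => by
      rw [pvMkRanges]
      have hgt := (List.pairwise_cons.mp hp).1
      have hp' := (List.pairwise_cons.mp hp).2
      have hb' : ∀ t ∈ rest, s + 1 ≤ t ∧ t < n := by
        intro t ht
        have := hb t (by simp [ht])
        have := hgt t ht
        omega
      apply List.pairwise_append.mpr
      refine ⟨by split <;> simp, mk_pairwise n rest (s + 1) hp' hb', ?_⟩
      intro I hI J hJ
      have hJ1 := (mk_bounds n rest (s + 1) hp' hb' J hJ).1
      split at hI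
      · simp at hI; subst hI; simp; omega
      · simp at hI

-- ---------- derived interval lemmas (seps = (range n).filter F) ----------

def pvRR (F : Nat → Bool) (n : Nat) : List (Nat × Nat) :=
  pvMkRanges 0 ((List.range n).filter F) n

lemma filt_sorted (F : Nat → Bool) (n : Nat) : ((List.range n).filter F).Pairwise (· < ·) :=
  (List.pairwise_lt_range).sublist List.filter_sublist

lemma filt_bounds (F : Nat → Bool) (n : Nat) : ∀ s ∈ (List.range n).filter F, 0 ≤ s ∧ s < n := by
  intro s hs
  have := List.mem_range.mp (List.mem_of_mem_filter hs)
  omega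

lemma filt_mem (F : Nat → Bool) (n : Nat) : ∀ x, 0 ≤ x → x < n → (x ∈ (List.range n).filter F ↔ F x = true) := by
  intro x _ hx
  rw [List.mem_filter, List.mem_range]
  exact ⟨fun h => h.2, fun h => ⟨hx, h⟩⟩

lemma pvRR_bounds {F : Nat → Bool} {n : Nat} {ab : Nat × Nat} (hab : ab ∈ pvRR F n) :
    ab.1 < ab.2 ∧ ab.2 ≤ n :=
  ⟨(mk_bounds n _ 0 (filt_sorted F n) (filt_bounds F n) ab hab).2.1,
   (mk_bounds n _ 0 (filt_sorted F n) (filt_bounds F n) ab hab).2.2⟩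

lemma pvRR_noF {F : Nat → Bool} {n : Nat} {ab : Nat × Nat} (hab : ab ∈ pvRR F n) :
    ∀ x, ab.1 ≤ x → x < ab.2 → F x = false :=
  mk_noF n F _ 0 (filt_sorted F n) (filt_bounds F n) (filt_mem F n) ab hab

lemma pvRR_start {F : Nat → Bool} {n : Nat} {ab : Nat × Nat} (hab : ab ∈ pvRR F n)
    {r : Nat} (h1 : ab.1 ≤ r) (h2 : r < ab.2) : pvBS F r = ab.1 := by
  have hle : pvBS F r ≤ ab.1 := pvBS_le_of F h1 (fun x hx hxr =>
    pvRR_noF hab x hx (by omega))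
  have hge : ab.1 ≤ pvBS F r := by
    apply pvBS_ge F h1
    have := mk_left n F _ 0 (fun s hs => (List.mem_filter.mp hs).2) (Or.inl rfl) ab hab
    rcases this with h | ⟨h1', h2'⟩
    · exact Or.inl h
    · exact Or.inr ⟨h1', h2'⟩
  omega

lemma pvRR_pairwise (F : Nat → Bool) (n : Nat) :
    (pvRR F n).Pairwise (fun I J => I.2 ≤ J.1) :=
  mk_pairwise n _ 0 (filt_sorted F n) (filt_bounds F n)

-- two members sharing a point (or just a left end) are equal
lemma pvRR_unique {F : Nat → Bool} {n : Nat} {ab ab' : Nat × Nat}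
    (hab : ab ∈ pvRR F n) (hab' : ab' ∈ pvRR F n) (h : ab.1 = ab'.1) : ab = ab' := by
  by_contra hne
  have hsym : ∀ I J : Nat × Nat, I ∈ pvRR F n → J ∈ pvRR F n → I ≠ J →
      (I.2 ≤ J.1 ∨ J.2 ≤ I.1) := by
    have hpw : (pvRR F n).Pairwise (fun I J => I.2 ≤ J.1 ∨ J.2 ≤ I.1) :=
      (pvRR_pairwise F n).imp (fun h => Or.inl h)
    exact fun I J hI hJ hIJ => List.Pairwise.forall
      (fun I J h => h.symm.imp (fun a => a) (fun a => a)) hpw hI hJ hIJ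
  have h1 := pvRR_bounds hab
  have h2 := pvRR_bounds hab'
  rcases hsym ab ab' hab hab' hne with h' | h' <;> omega

lemma pvRR_cover {F : Nat → Bool} {n : Nat} {r : Nat} (h2 : r < n) (hF : F r = false) :
    ∃ ab ∈ pvRR F n, ab.1 ≤ r ∧ r < ab.2 :=
  mk_cover n F _ 0 (filt_sorted F n) (filt_bounds F n) (filt_mem F n) r (Nat.zero_le r) h2 hF

-- membership in a given interval ↔ same block start
lemma pvRR_mem_iff {F : Nat → Bool} {n : Nat} {ab : Nat × Nat} (hab : ab ∈ pvRR F n) :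
    ∀ x, (x < n ∧ F x = false ∧ pvBS F x = ab.1) ↔ (ab.1 ≤ x ∧ x < ab.2) := by
  intro x
  constructor
  · rintro ⟨hx, hFx, hbs⟩
    obtain ⟨ab', hab', h1, h2⟩ := pvRR_cover hx hFx
    have : pvBS F x = ab'.1 := pvRR_start hab' h1 h2
    have : ab = ab' := pvRR_unique hab hab' (by omega)
    subst this
    exact ⟨h1, h2⟩
  · rintro ⟨h1, h2⟩
    have hb := pvRR_bounds hab
    exact ⟨by omega, pvRR_noF hab x h1 h2, pvRR_start hab h1 h2⟩

-- ---------- A-side: pvSet2 / pvFillA pointwise ----------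

lemma getD_set {α : Type} (l : List α) (i j : Nat) (a : α) (d : α) :
    (l.set i a).getD j d = if i = j ∧ i < l.length then a else l.getD j d := by
  rcases Nat.lt_or_ge i l.length with h | h
  · by_cases hij : i = j
    · subst hij
      simp [List.getD, h]
    · simp [List.getD, hij]
  · rw [List.set_eq_of_length_le h]
    simp only [if_neg (by omega : ¬(i = j ∧ i < l.length))]

lemma pvSet2_len (out : List (List Int)) (r c : Nat) (v : Int) :
    (pvSet2 out r c v).length = out.length := by
  rw [pvSet2, List.length_set]

lemma pvSet2_rowlen (out : List (List Int)) (r c : Nat) (v : Int) (i : Nat) :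
    ((pvSet2 out r c v).getD i []).length = (out.getD i []).length := by
  rw [pvSet2, getD_set]
  split
  · rename_i h
    rw [List.length_set, h.1]
  · rfl

lemma pvG_pvSet2 (out : List (List Int)) (r c : Nat) (v : Int) (i j : Nat) :
    pvG (pvSet2 out r c v) i j =
      if r = i ∧ c = j ∧ r < out.length ∧ c < (out.getD r []).length then v
      else pvG out i j := by
  rw [pvG, pvSet2, getD_set]
  by_cases hr : r < out.length
  · by_cases hri : r = i
    · subst hri
      rw [if_pos ⟨rfl, hr⟩, getD_set]
      by_cases hcj : c = j
      · subst hcj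
        by_cases hc : c < (out.getD r []).length
        · rw [if_pos ⟨rfl, hc⟩, if_pos ⟨rfl, rfl, hr, hc⟩]
        · rw [if_neg (by tauto), if_neg (by tauto)]; rfl
      · rw [if_neg (by tauto), if_neg (by tauto)]; rfl
    · rw [if_neg (by tauto), if_neg (by tauto)]; rfl
  · rw [if_neg (by tauto), if_neg (by tauto)]; rfl

lemma fillRow_len (grid : List (List Int)) (r : Nat) (f : Int) (l : List Nat) (out : List (List Int)) :
    ((l.foldl (fun out c => if pvG grid r c != 5 then pvSet2 out r c f else out) out)).length
      = out.length :=
  foldl_pres List.length _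
    (fun a b => by
      by_cases h : (pvG grid r b != 5) = true
      · rw [if_pos h]; exact pvSet2_len a r b f
      · rw [if_neg h]) l out

lemma fillRow_rowlen (grid : List (List Int)) (r : Nat) (f : Int) (l : List Nat) (out : List (List Int)) (i : Nat) :
    (((l.foldl (fun out c => if pvG grid r c != 5 then pvSet2 out r c f else out) out)).getD i []).length
      = ((out.getD i []).length) :=
  foldl_pres (fun o => (o.getD i []).length) _
    (fun a b => by
      by_cases h : (pvG grid r b != 5) = true
      · rw [if_pos h]; exact pvSet2_rowlen a r b f i
      · rw [if_neg h]) l out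

lemma fillRow_vAt (grid : List (List Int)) (r : Nat) (f : Int) :
    ∀ (k cs : Nat) (out : List (List Int)) (i j : Nat),
      pvG ((List.range' cs k).foldl (fun out c => if pvG grid r c != 5 then pvSet2 out r c f else out) out) i j
        = if r = i ∧ cs ≤ j ∧ j < cs + k ∧ pvG grid r j ≠ 5 ∧ r < out.length ∧ j < (out.getD r []).length
          then f else pvG out i j
  | 0, cs, out, i, j => by
      have hno : ¬(r = i ∧ cs ≤ j ∧ j < cs + 0 ∧ pvG grid r j ≠ 5 ∧ r < out.length ∧ j < (out.getD r []).length) := by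
        rintro ⟨_, h1, h2, _⟩; omega
      rw [List.range'_zero, List.foldl_nil, if_neg hno]
  | k + 1, cs, out, i, j => by
      rw [List.range'_succ, List.foldl_cons, fillRow_vAt grid r f k (cs + 1) _ i j]
      have hl : (if pvG grid r cs != 5 then pvSet2 out r cs f else out).length = out.length := by
        split
        · exact pvSet2_len out r cs f
        · rfl
      have hrl : ((if pvG grid r cs != 5 then pvSet2 out r cs f else out).getD r []).length
          = (out.getD r []).length := by
        split
        · exact pvSet2_rowlen out r cs f r
        · rfl
      simp only [hl, hrl]
      by_cases hfive : (pvG grid r cs != 5) = true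
      · have hP5 : pvG grid r cs ≠ 5 := by simpa using hfive
        rw [if_pos hfive, pvG_pvSet2]
        by_cases hri : r = i
        · subst hri
          by_cases hcj : cs = j
          · subst hcj
            split_ifs <;> first | rfl | omega
          · split_ifs <;> first | rfl | omega
        · split_ifs <;> first | rfl | omega
      · have hP5 : pvG grid r cs = 5 := by simpa using hfive
        rw [if_neg hfive]
        by_cases hri : r = i
        · subst hri
          by_cases hcj : cs = j
          · subst hcj
            split_ifs <;> first | rfl | omega
          · split_ifs <;> first | rfl | omega
        · split_ifs <;> first | rfl | omega

-- ---------- A-side: whole-fill and section folds ----------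

lemma pvFillA_len (grid : List (List Int)) (rs re cs ce : Nat) (f : Int) (out : List (List Int)) :
    (pvFillA grid rs re cs ce f out).length = out.length := by
  rw [pvFillA]
  exact foldl_pres List.length _ (fun a b => fillRow_len grid b f _ a) _ out

lemma pvFillA_rowlen (grid : List (List Int)) (rs re cs ce : Nat) (f : Int) (out : List (List Int)) (i : Nat) :
    ((pvFillA grid rs re cs ce f out).getD i []).length = (out.getD i []).length := by
  rw [pvFillA]
  exact foldl_pres (fun o => (o.getD i []).length) _ (fun a b => fillRow_rowlen grid b f _ a i) _ out

lemma fill2_vAt (grid : List (List Int)) (f : Int) (kc cs : Nat) :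
    ∀ (kr rs : Nat) (out : List (List Int)) (i j : Nat),
      pvG ((List.range' rs kr).foldl
            (fun out r => (List.range' cs kc).foldl
              (fun out c => if pvG grid r c != 5 then pvSet2 out r c f else out) out) out) i j
        = if rs ≤ i ∧ i < rs + kr ∧ cs ≤ j ∧ j < cs + kc ∧ pvG grid i j ≠ 5
              ∧ i < out.length ∧ j < (out.getD i []).length
          then f else pvG out i j
  | 0, rs, out, i, j => by
      have hno : ¬(rs ≤ i ∧ i < rs + 0 ∧ cs ≤ j ∧ j < cs + kc ∧ pvG grid i j ≠ 5
          ∧ i < out.length ∧ j < (out.getD i []).length) := by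
        rintro ⟨h1, h2, _⟩; omega
      rw [List.range'_zero, List.foldl_nil, if_neg hno]
  | kr + 1, rs, out, i, j => by
      rw [List.range'_succ, List.foldl_cons, fill2_vAt grid f kc cs kr (rs + 1) _ i j]
      have hl : ((List.range' cs kc).foldl
          (fun out c => if pvG grid rs c != 5 then pvSet2 out rs c f else out) out).length = out.length :=
        fillRow_len grid rs f _ out
      have hrl : (((List.range' cs kc).foldl
          (fun out c => if pvG grid rs c != 5 then pvSet2 out rs c f else out) out).getD i []).length
          = (out.getD i []).length :=
        fillRow_rowlen grid rs f _ out i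
      simp only [hl, hrl]
      rw [fillRow_vAt grid rs f kc cs out i j]
      by_cases hri : rs = i
      · subst hri
        split_ifs <;> first | rfl | omega
      · split_ifs <;> first | rfl | omega

lemma pvFillA_vAt (grid : List (List Int)) (rs re cs ce : Nat) (f : Int) (out : List (List Int)) (i j : Nat) :
    pvG (pvFillA grid rs re cs ce f out) i j
      = if rs ≤ i ∧ i < rs + (re - rs) ∧ cs ≤ j ∧ j < cs + (ce - cs) ∧ pvG grid i j ≠ 5
            ∧ i < out.length ∧ j < (out.getD i []).length
        then f else pvG out i j := by
  rw [pvFillA]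
  exact fill2_vAt grid f (ce - cs) cs (re - rs) rs out i j

-- one section step of A's main loop (definitionally the body of solve_54d9e175)
def pvSecStep (grid : List (List Int)) (a b : Nat) (out : List (List Int)) (cc : Nat × Nat) : List (List Int) :=
  let center := pvCenterA grid a b cc.1 cc.2
  if center != 0 then pvFillA grid a b cc.1 cc.2 (center + 5) out else out

def pvRowStep (grid : List (List Int)) (CC : List (Nat × Nat)) (out : List (List Int)) (rr : Nat × Nat) : List (List Int) :=
  CC.foldl (pvSecStep grid rr.1 rr.2) out

lemma pvSecStep_len (grid : List (List Int)) (a b : Nat) (out : List (List Int)) (cc : Nat × Nat) :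
    (pvSecStep grid a b out cc).length = out.length := by
  rw [pvSecStep]
  split
  · exact pvFillA_len grid a b cc.1 cc.2 _ out
  · rfl

lemma pvSecStep_rowlen (grid : List (List Int)) (a b : Nat) (out : List (List Int)) (cc : Nat × Nat) (i : Nat) :
    ((pvSecStep grid a b out cc).getD i []).length = (out.getD i []).length := by
  rw [pvSecStep]
  split
  · exact pvFillA_rowlen grid a b cc.1 cc.2 _ out i
  · rfl

lemma ccfold_len (grid : List (List Int)) (a b : Nat) (CCl : List (Nat × Nat)) (out : List (List Int)) :
    (CCl.foldl (pvSecStep grid a b) out).length = out.length :=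
  foldl_pres List.length _ (fun o cc => pvSecStep_len grid a b o cc) CCl out

lemma ccfold_rowlen (grid : List (List Int)) (a b : Nat) (CCl : List (Nat × Nat)) (out : List (List Int)) (i : Nat) :
    ((CCl.foldl (pvSecStep grid a b) out).getD i []).length = (out.getD i []).length :=
  foldl_pres (fun o => (o.getD i []).length) _ (fun o cc => pvSecStep_rowlen grid a b o cc i) CCl out

lemma rrfold_len (grid : List (List Int)) (CC : List (Nat × Nat)) (RRl : List (Nat × Nat)) (out : List (List Int)) :
    (RRl.foldl (pvRowStep grid CC) out).length = out.length :=
  foldl_pres List.length (pvRowStep grid CC)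
    (fun o rr => by rw [pvRowStep]; exact ccfold_len grid rr.1 rr.2 CC o) RRl out

lemma rrfold_rowlen (grid : List (List Int)) (CC : List (Nat × Nat)) (RRl : List (Nat × Nat)) (out : List (List Int)) (i : Nat) :
    ((RRl.foldl (pvRowStep grid CC) out).getD i []).length = (out.getD i []).length :=
  foldl_pres (fun o => (o.getD i []).length) (pvRowStep grid CC)
    (fun o rr => by rw [pvRowStep]; exact ccfold_rowlen grid rr.1 rr.2 CC o i) RRl out

lemma pvSecStep_notouch (grid : List (List Int)) (a b : Nat) (out : List (List Int)) (cc : Nat × Nat)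
    (r c : Nat) (h : ¬(a ≤ r ∧ r < b ∧ cc.1 ≤ c ∧ c < cc.2)) :
    pvG (pvSecStep grid a b out cc) r c = pvG out r c := by
  rw [pvSecStep]
  split
  · rw [pvFillA_vAt, if_neg (by rintro ⟨h1, h2, h3, h4, _⟩; omega)]
  · rfl

lemma ccfold_notouch (grid : List (List Int)) (a b : Nat) (r c : Nat) :
    ∀ (CCl : List (Nat × Nat)) (out : List (List Int)),
      (∀ cc ∈ CCl, ¬(a ≤ r ∧ r < b ∧ cc.1 ≤ c ∧ c < cc.2)) →
      pvG (CCl.foldl (pvSecStep grid a b) out) r c = pvG out r c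
  | [], out, _ => rfl
  | cc :: l, out, h => by
      rw [List.foldl_cons, ccfold_notouch grid a b r c l _ (fun x hx => h x (List.mem_cons_of_mem _ hx)),
        pvSecStep_notouch grid a b out cc r c (h cc List.mem_cons_self)]

lemma rrfold_notouch (grid : List (List Int)) (CC : List (Nat × Nat)) (r c : Nat) :
    ∀ (RRl : List (Nat × Nat)) (out : List (List Int)),
      (∀ rr ∈ RRl, ¬(rr.1 ≤ r ∧ r < rr.2)) →
      pvG (RRl.foldl (pvRowStep grid CC) out) r c = pvG out r c
  | [], out, _ => rfl
  | rr :: l, out, h => by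
      rw [List.foldl_cons, rrfold_notouch grid CC r c l _ (fun x hx => h x (List.mem_cons_of_mem _ hx))]
      rw [pvRowStep, ccfold_notouch grid rr.1 rr.2 r c CC out (fun cc _ => by
        have := h rr List.mem_cons_self
        tauto)]

-- ---------- center scan as a first-match over the section's cells ----------

def pvRect (a b ca cb : Nat) : List (Nat × Nat) :=
  (List.range' a (b - a)).flatMap (fun r => (List.range' ca (cb - ca)).map (fun c => (r, c)))

def pvQ (grid : List (List Int)) (x : Nat × Nat) : Bool :=
  pvG grid x.1 x.2 != 0 && pvG grid x.1 x.2 != 5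

lemma pvCenterA_eq_find (grid : List (List Int)) (a b ca cb : Nat) :
    pvCenterA grid a b ca cb
      = (((pvRect a b ca cb).find? (pvQ grid)).map (fun x => pvG grid x.1 x.2)).getD 0 := by
  have hflat : (pvRect a b ca cb).foldl (pvScanStep (pvQ grid) (fun x => pvG grid x.1 x.2)) 0
      = pvCenterA grid a b ca cb := by
    rw [pvRect, foldl_flatMap, pvCenterA]
    apply List.foldl_ext
    intro acc r _
    rw [List.foldl_map]
    by_cases hacc : acc ≠ 0
    · rw [if_pos (by simpa using hacc)]
      exact foldl_scan_keep (fun y => pvQ grid (r, y)) (fun y => pvG grid r y)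
        (List.range' ca (cb - ca)) acc hacc
    · push Not at hacc
      subst hacc
      rw [if_neg (by simp)]
      rfl
  rw [← hflat]
  exact foldl_scan_eq_find _ _ _ (fun x _ hq => by
    rw [pvQ] at hq
    simpa using (Bool.and_elim_left hq))

lemma rrfold_notouch_c (grid : List (List Int)) (CC : List (Nat × Nat)) (r c : Nat)
    (hCC : ∀ cc ∈ CC, ¬(cc.1 ≤ c ∧ c < cc.2)) :
    ∀ (RRl : List (Nat × Nat)) (out : List (List Int)),
      pvG (RRl.foldl (pvRowStep grid CC) out) r c = pvG out r c
  | [], out => rfl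
  | rr :: l, out => by
      rw [List.foldl_cons, rrfold_notouch_c grid CC r c hCC l _]
      rw [pvRowStep, ccfold_notouch grid rr.1 rr.2 r c CC out (fun cc hcc => by
        have := hCC cc hcc
        tauto)]

-- ---------- range splitting ----------

lemma range_split (n a b : Nat) (hab : a ≤ b) (hbn : b ≤ n) :
    List.range n = List.range' 0 a ++ List.range' a (b - a) ++ List.range' b (n - b) := by
  have e1 : List.range' 0 a ++ List.range' a (b - a) = List.range' 0 b := by
    have h := List.range'_append_1 (s := 0) (m := a) (n := b - a)
    rw [Nat.zero_add] at h
    rw [h, Nat.add_sub_cancel' hab]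
  have e2 : List.range' 0 b ++ List.range' b (n - b) = List.range' 0 n := by
    have h := List.range'_append_1 (s := 0) (m := b) (n := n - b)
    rw [Nat.zero_add] at h
    rw [h, Nat.add_sub_cancel' hbn]
  rw [List.range_eq_range', ← e2, ← e1]

lemma flatMap_split {α : Type} (g : Nat → List α) (n a b : Nat) (hab : a ≤ b) (hbn : b ≤ n)
    (h0 : ∀ r, r < a → g r = []) (h2 : ∀ r, b ≤ r → r < n → g r = []) :
    (List.range n).flatMap g = (List.range' a (b - a)).flatMap g := by
  rw [range_split n a b hab hbn, List.flatMap_append, List.flatMap_append]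
  have e0 : (List.range' 0 a).flatMap g = [] := by
    apply List.flatMap_eq_nil_iff.mpr
    intro x hx
    exact h0 x (by have := List.mem_range'_1.mp hx; omega)
  have e2 : (List.range' b (n - b)).flatMap g = [] := by
    apply List.flatMap_eq_nil_iff.mpr
    intro x hx
    have := List.mem_range'_1.mp hx
    exact h2 x (by omega) (by omega)
  rw [e0, e2]
  simp

lemma filter_split (P : Nat → Bool) (n a b : Nat) (hab : a ≤ b) (hbn : b ≤ n)
    (h0 : ∀ c, c < a → P c = false) (h2 : ∀ c, b ≤ c → c < n → P c = false) :
    (List.range n).filter P = (List.range' a (b - a)).filter P := by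
  rw [range_split n a b hab hbn, List.filter_append, List.filter_append]
  have e0 : (List.range' 0 a).filter P = [] := by
    apply List.filter_eq_nil_iff.mpr
    intro x hx
    simp [h0 x (by have := List.mem_range'_1.mp hx; omega)]
  have e2 : (List.range' b (n - b)).filter P = [] := by
    apply List.filter_eq_nil_iff.mpr
    intro x hx
    have := List.mem_range'_1.mp hx
    simp [h2 x (by omega) (by omega)]
  rw [e0, e2]
  simp

lemma filter_flatMap {α β : Type} (g : α → List β) (p : β → Bool) :
    ∀ (l : List α), (l.flatMap g).filter p = l.flatMap (fun x => (g x).filter p)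
  | [] => rfl
  | x :: xs => by
      rw [List.flatMap_cons, List.filter_append, filter_flatMap g p xs, List.flatMap_cons]

-- ---------- B-side: the dict pass over the flattened traversal ----------

def pvCells (h w : Nat) : List (Nat × Nat) :=
  (List.range h).flatMap (fun r => (List.range w).map (fun c => (r, c)))

def pvKey (rst cst : List (Option Nat)) (x : Nat × Nat) : Nat × Nat :=
  ((rst.getD x.1 none).getD 0, (cst.getD x.2 none).getD 0)

def pvQQ (grid : List (List Int)) (rst cst : List (Option Nat)) (x : Nat × Nat) : Bool :=
  (rst.getD x.1 none).isSome &&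
    ((cst.getD x.2 none).isSome && (pvG grid x.1 x.2 != 0 && pvG grid x.1 x.2 != 5))

lemma pvFirst_eq_flat (grid : List (List Int)) (h w : Nat) (rst cst : List (Option Nat)) :
    pvFirst grid h w rst cst
      = (pvCells h w).foldl
          (fun d x => if pvQQ grid rst cst x && (d.get? (pvKey rst cst x)).isNone
                      then d.insert (pvKey rst cst x) (pvG grid x.1 x.2) else d)
          PySem.Dict.empty := by
  rw [pvFirst, pvCells, foldl_flatMap]
  apply List.foldl_ext
  intro d r _
  rw [List.foldl_map]
  cases hr : rst.getD r none with
  | none =>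
    simp only [List.getD_eq_getElem?_getD] at hr
    show d = _
    induction (List.range w) generalizing d with
    | nil => rfl
    | cons c cs ih =>
      rw [List.foldl_cons]
      have hstep : (if pvQQ grid rst cst (r, c) && (d.get? (pvKey rst cst (r, c))).isNone
          then d.insert (pvKey rst cst (r, c)) (pvG grid r c) else d) = d := by
        rw [if_neg]
        simp [pvQQ, hr]
      rw [hstep]
      exact ih d
  | some a =>
    simp only [List.getD_eq_getElem?_getD] at hr
    apply List.foldl_ext
    intro d' c _
    cases hc : cst.getD c none with
    | none =>
      simp only [List.getD_eq_getElem?_getD] at hc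
      simp [pvQQ, hc]
    | some b =>
      simp only [List.getD_eq_getElem?_getD] at hc
      simp only [pvQQ, pvKey, List.getD_eq_getElem?_getD, hr, hc, Option.isSome_some,
        Option.getD_some, Bool.true_and]
      try rw [Bool.and_assoc]

lemma pvFirst_get? (grid : List (List Int)) (h w : Nat) (rst cst : List (Option Nat)) (k : Nat × Nat) :
    (pvFirst grid h w rst cst).get? k
      = ((pvCells h w).filter
          (fun x => pvQQ grid rst cst x && (pvKey rst cst x == k))).head?.map
            (fun x => pvG grid x.1 x.2) := by
  rw [pvFirst_eq_flat, dict_foldl_first]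
  simp

lemma cells_filter_eq (grid : List (List Int)) (h w : Nat) (F Gc : Nat → Bool)
    (rst cst : List (Option Nat))
    (hrst : ∀ r, r < h → rst.getD r none = if F r then none else some (pvBS F r))
    (hcst : ∀ c, c < w → cst.getD c none = if Gc c then none else some (pvBS Gc c))
    (RI CI : Nat × Nat) (hRI : RI ∈ pvRR F h) (hCI : CI ∈ pvRR Gc w) :
    (pvCells h w).filter (fun x => pvQQ grid rst cst x && (pvKey rst cst x == (RI.1, CI.1)))
      = (pvRect RI.1 RI.2 CI.1 CI.2).filter (pvQ grid) := by
  have hRb := pvRR_bounds hRI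
  have hCb := pvRR_bounds hCI
  simp only [List.getD_eq_getElem?_getD] at hrst hcst
  rw [pvCells, pvRect, filter_flatMap, filter_flatMap]
  rw [flatMap_split _ h RI.1 RI.2 (by omega) (by omega) ?lo ?hi]
  case lo =>
    intro r hr
    apply List.filter_eq_nil_iff.mpr
    intro x hx
    obtain ⟨c, _, rfl⟩ := List.mem_map.mp hx
    have hr' : ¬(RI.1 ≤ r ∧ r < RI.2) := by omega
    by_cases hF : F r = true
    · simp [pvQQ, hrst r (by omega), hF]
    · have hbs : ¬(pvBS F r = RI.1) := by
        intro hb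
        exact hr' ((pvRR_mem_iff hRI r).mp ⟨by omega, by simpa using hF, hb⟩)
      simp [pvQQ, pvKey, hrst r (by omega), hF, hbs]
  case hi =>
    intro r hr1 hr2
    apply List.filter_eq_nil_iff.mpr
    intro x hx
    obtain ⟨c, _, rfl⟩ := List.mem_map.mp hx
    have hr' : ¬(RI.1 ≤ r ∧ r < RI.2) := by omega
    by_cases hF : F r = true
    · simp [pvQQ, hrst r hr2, hF]
    · have hbs : ¬(pvBS F r = RI.1) := by
        intro hb
        exact hr' ((pvRR_mem_iff hRI r).mp ⟨hr2, by simpa using hF, hb⟩)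
      simp [pvQQ, pvKey, hrst r hr2, hF, hbs]
  · apply List.flatMap_congr
    intro r hr
    have hrRI : RI.1 ≤ r ∧ r < RI.2 := by
      have := List.mem_range'_1.mp hr
      omega
    have hrh : r < h := by omega
    have hFr : F r = false := pvRR_noF hRI r hrRI.1 hrRI.2
    have hbsr : pvBS F r = RI.1 := pvRR_start hRI hrRI.1 hrRI.2
    rw [List.filter_map, List.filter_map]
    congr 1
    have hsplit := filter_split
      ((fun x => pvQQ grid rst cst x && (pvKey rst cst x == (RI.1, CI.1))) ∘ (fun c => (r, c)))
      w CI.1 CI.2 (by omega) (by omega) ?clo ?chi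
    case clo =>
      intro c hc
      by_cases hG : Gc c = true
      · simp [Function.comp, pvQQ, hcst c (by omega), hG]
      · have hbs : ¬(pvBS Gc c = CI.1) := by
          intro hb
          have := (pvRR_mem_iff hCI c).mp ⟨by omega, by simpa using hG, hb⟩
          omega
        simp [Function.comp, pvQQ, pvKey, hcst c (by omega), hG, hbs, hrst r hrh, hFr]
    case chi =>
      intro c hc1 hc2
      by_cases hG : Gc c = true
      · simp [Function.comp, pvQQ, hcst c hc2, hG]
      · have hbs : ¬(pvBS Gc c = CI.1) := by
          intro hb
          have := (pvRR_mem_iff hCI c).mp ⟨hc2, by simpa using hG, hb⟩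
          omega
        simp [Function.comp, pvQQ, pvKey, hcst c hc2, hG, hbs, hrst r hrh, hFr]
    rw [hsplit]
    apply List.filter_congr
    intro c hc
    have hcCI : CI.1 ≤ c ∧ c < CI.2 := by
      have := List.mem_range'_1.mp hc
      omega
    have hcw : c < w := by omega
    have hGc : Gc c = false := pvRR_noF hCI c hcCI.1 hcCI.2
    have hbsc : pvBS Gc c = CI.1 := pvRR_start hCI hcCI.1 hcCI.2
    simp [Function.comp, pvQQ, pvKey, pvQ, hrst r hrh, hcst c hcw, hFr, hGc, hbsr, hbsc]

-- ---------- main assembly ----------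

lemma headD_eq_getD (grid : List (List Int)) : grid.headD [] = grid.getD 0 [] := by
  cases grid <;> rfl

lemma getD_map_range {α : Type} (n : Nat) (f : Nat → α) (d : α) (r : Nat) (hr : r < n) :
    ((List.range n).map f).getD r d = f r := by
  rw [List.getD_eq_getElem?_getD, List.getElem?_map, List.getElem?_range hr]
  rfl

lemma pv_getElem_eq_getD {α : Type} (l : List α) (d : α) (r : Nat) (h : r < l.length) :
    l[r] = l.getD r d := by
  rw [List.getD_eq_getElem?_getD, List.getElem?_eq_getElem h]
  rfl

lemma ccfold_hit' (grid : List (List Int)) (a b : Nat) (r c : Nat) (CI : Nat × Nat)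
    (l1 l2 : List (Nat × Nat))
    (hno1 : ∀ cc ∈ l1, ¬(cc.1 ≤ c ∧ c < cc.2)) (hno2 : ∀ cc ∈ l2, ¬(cc.1 ≤ c ∧ c < cc.2))
    (hr : a ≤ r ∧ r < b) (hc : CI.1 ≤ c ∧ c < CI.2)
    (out : List (List Int)) (hlen : r < out.length) (hrow : c < (out.getD r []).length) :
    pvG ((l1 ++ CI :: l2).foldl (pvSecStep grid a b) out) r c
      = if pvCenterA grid a b CI.1 CI.2 ≠ 0 ∧ pvG grid r c ≠ 5
        then pvCenterA grid a b CI.1 CI.2 + 5 else pvG out r c := by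
  rw [List.foldl_append, List.foldl_cons]
  rw [ccfold_notouch grid a b r c l2 _ (fun cc hcc => by have := hno2 cc hcc; tauto)]
  have hs1len : (l1.foldl (pvSecStep grid a b) out).length = out.length :=
    ccfold_len grid a b l1 out
  have hs1row : ((l1.foldl (pvSecStep grid a b) out).getD r []).length = (out.getD r []).length :=
    ccfold_rowlen grid a b l1 out r
  have hnt : pvG (l1.foldl (pvSecStep grid a b) out) r c = pvG out r c :=
    ccfold_notouch grid a b r c l1 out (fun cc hcc => by have := hno1 cc hcc; tauto)
  rw [pvSecStep]
  split
  · rename_i hcen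
    have hcen' : pvCenterA grid a b CI.1 CI.2 ≠ 0 := by simpa using hcen
    rw [pvFillA_vAt]
    simp only [hs1len, hs1row]
    by_cases hg5 : pvG grid r c ≠ 5
    · rw [if_pos ⟨hr.1, by omega, hc.1, by omega, hg5, by omega, by omega⟩,
        if_pos ⟨hcen', hg5⟩]
    · rw [if_neg (by tauto), if_neg (by tauto), hnt]
  · rename_i hcen
    have hcen' : ¬(pvCenterA grid a b CI.1 CI.2 ≠ 0) := by simpa using hcen
    rw [if_neg (by tauto), hnt]

lemma rrfold_hit (grid : List (List Int)) (F Gc : Nat → Bool) (h w : Nat)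
    (RI CI : Nat × Nat) (hRI : RI ∈ pvRR F h) (hCI : CI ∈ pvRR Gc w)
    (r j : Nat) (hrRI : RI.1 ≤ r ∧ r < RI.2) (hjCI : CI.1 ≤ j ∧ j < CI.2)
    (hrl : r < grid.length) (hjl : j < (grid.getD r []).length) :
    pvG ((pvRR F h).foldl (pvRowStep grid (pvRR Gc w)) grid) r j
      = if pvCenterA grid RI.1 RI.2 CI.1 CI.2 ≠ 0 ∧ pvG grid r j ≠ 5
        then pvCenterA grid RI.1 RI.2 CI.1 CI.2 + 5 else pvG grid r j := by
  obtain ⟨m1, m2, hm⟩ := List.append_of_mem hRI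
  obtain ⟨l1, l2, hl⟩ := List.append_of_mem hCI
  have hpwR := pvRR_pairwise F h
  rw [hm] at hpwR
  obtain ⟨pw1, pw2, hx⟩ := List.pairwise_append.mp hpwR
  have hm1 : ∀ rr ∈ m1, ¬(rr.1 ≤ r ∧ r < rr.2) := by
    intro rr hrr hcon
    have := hx rr hrr RI List.mem_cons_self
    omega
  have hm2 : ∀ rr ∈ m2, ¬(rr.1 ≤ r ∧ r < rr.2) := by
    intro rr hrr hcon
    have := (List.pairwise_cons.mp pw2).1 rr hrr
    omega
  have hpwC := pvRR_pairwise Gc w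
  rw [hl] at hpwC
  obtain ⟨cw1, cw2, cx⟩ := List.pairwise_append.mp hpwC
  have hl1 : ∀ cc ∈ l1, ¬(cc.1 ≤ j ∧ j < cc.2) := by
    intro cc hcc hcon
    have := cx cc hcc CI List.mem_cons_self
    omega
  have hl2 : ∀ cc ∈ l2, ¬(cc.1 ≤ j ∧ j < cc.2) := by
    intro cc hcc hcon
    have := (List.pairwise_cons.mp cw2).1 cc hcc
    omega
  rw [hm, List.foldl_append, List.foldl_cons]
  rw [rrfold_notouch grid _ r j m2 _ hm2]
  have hnt1 : pvG (m1.foldl (pvRowStep grid (pvRR Gc w)) grid) r j = pvG grid r j :=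
    rrfold_notouch grid _ r j m1 grid hm1
  have hlen1 : (m1.foldl (pvRowStep grid (pvRR Gc w)) grid).length = grid.length :=
    rrfold_len grid _ m1 grid
  have hrow1 : ((m1.foldl (pvRowStep grid (pvRR Gc w)) grid).getD r []).length
      = (grid.getD r []).length :=
    rrfold_rowlen grid _ m1 grid r
  rw [pvRowStep]
  have hcc := ccfold_hit' grid RI.1 RI.2 r j CI l1 l2 hl1 hl2 hrRI hjCI
      (m1.foldl (pvRowStep grid (pvRR Gc w)) grid) (by omega) (by omega)
  rw [← hl] at hcc
  rw [hcc, hnt1]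

lemma first_get_eq_center (grid : List (List Int)) (h w : Nat) (F Gc : Nat → Bool)
    (rst cst : List (Option Nat))
    (hrst : ∀ r, r < h → rst.getD r none = if F r then none else some (pvBS F r))
    (hcst : ∀ c, c < w → cst.getD c none = if Gc c then none else some (pvBS Gc c))
    (RI CI : Nat × Nat) (hRI : RI ∈ pvRR F h) (hCI : CI ∈ pvRR Gc w) :
    (pvFirst grid h w rst cst).get? (RI.1, CI.1)
      = ((pvRect RI.1 RI.2 CI.1 CI.2).find? (pvQ grid)).map (fun x => pvG grid x.1 x.2) := by
  rw [pvFirst_get?, cells_filter_eq grid h w F Gc rst cst hrst hcst RI CI hRI hCI,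
    ← find?_eq_head_filter]

lemma foldl_append_match {α : Type} (o : Nat → Option Nat) (X : Nat → α) (Y : Nat → Nat → α) :
    ∀ (l : List Nat) (acc : List α),
      l.foldl (fun out r => match o r with
        | none => out ++ [X r]
        | some a => out ++ [Y r a]) acc
      = acc ++ l.map (fun r => match o r with | none => X r | some a => Y r a)
  | [], acc => by simp
  | x :: xs, acc => by
      rw [List.foldl_cons, foldl_append_match o X Y xs]
      cases ho : o x <;> simp [ho]

lemma main_eq (grid : List (List Int)) (hne : grid ≠ [])
    (hrows : ∀ row ∈ grid, (grid.headD []).length ≤ row.length) :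
    solve_54d9e175 grid = solve_54d9e175_alt grid := by
  have hA : solve_54d9e175 grid
      = (pvRR (fun r => pvSepRowA grid (grid.getD 0 []).length r) grid.length).foldl
          (pvRowStep grid (pvRR (fun c => pvSepColA grid grid.length c) (grid.getD 0 []).length))
          grid := by
    simp only [solve_54d9e175, List.map_id']
    rw [pvRangesA_eq, pvRangesA_eq]
    rfl
  rw [hA]
  conv_rhs => simp only [solve_54d9e175_alt]
  rw [foldl_append_match, List.nil_append]
  have hwle : ∀ i, i < grid.length → (grid.getD 0 []).length ≤ (grid.getD i []).length := by
    intro i hi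
    have hmem : grid.getD i [] ∈ grid := by
      rw [List.getD_eq_getElem?_getD, List.getElem?_eq_getElem hi]
      exact List.getElem_mem hi
    have := hrows _ hmem
    rwa [headD_eq_getD] at this
  have hseprow : ∀ r, r < grid.length →
      ((List.range grid.length).map (fun r =>
        (List.range (grid.getD 0 []).length).all (fun c => pvG grid r c == 5))).getD r false
        = pvSepRowA grid (grid.getD 0 []).length r := by
    intro r hr
    rw [getD_map_range _ _ _ r hr]
    rfl
  have hsepcol : ∀ c, c < (grid.getD 0 []).length →
      ((List.range (grid.getD 0 []).length).map (fun c =>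
        (List.range grid.length).all (fun r => pvG grid r c == 5))).getD c false
        = pvSepColA grid grid.length c := by
    intro c hc
    rw [getD_map_range _ _ _ c hc]
    rfl
  have hrst : ∀ r, r < grid.length →
      (pvStarts ((List.range grid.length).map (fun r =>
        (List.range (grid.getD 0 []).length).all (fun c => pvG grid r c == 5)))).getD r none
        = if pvSepRowA grid (grid.getD 0 []).length r then none
          else some (pvBS (fun i => pvSepRowA grid (grid.getD 0 []).length i) r) := by
    intro r hr
    rw [pvStarts_spec]
    have hlen : ((List.range grid.length).map (fun r =>
        (List.range (grid.getD 0 []).length).all (fun c => pvG grid r c == 5))).length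
        = grid.length := by
      rw [List.length_map, List.length_range]
    rw [hlen, getD_map_range _ _ _ r hr, hseprow r hr]
    by_cases hF : pvSepRowA grid (grid.getD 0 []).length r = true
    · rw [if_pos hF, if_pos hF]
    · rw [if_neg hF, if_neg hF,
        pvBS_congr _ _ r (fun i hi => hseprow i (by omega))]
  have hcst : ∀ c, c < (grid.getD 0 []).length →
      (pvStarts ((List.range (grid.getD 0 []).length).map (fun c =>
        (List.range grid.length).all (fun r => pvG grid r c == 5)))).getD c none
        = if pvSepColA grid grid.length c then none
          else some (pvBS (fun i => pvSepColA grid grid.length i) c) := by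
    intro c hc
    rw [pvStarts_spec]
    have hlen : ((List.range (grid.getD 0 []).length).map (fun c =>
        (List.range grid.length).all (fun r => pvG grid r c == 5))).length
        = (grid.getD 0 []).length := by
      rw [List.length_map, List.length_range]
    rw [hlen, getD_map_range _ _ _ c hc, hsepcol c hc]
    by_cases hG : pvSepColA grid grid.length c = true
    · rw [if_pos hG, if_pos hG]
    · rw [if_neg hG, if_neg hG,
        pvBS_congr _ _ c (fun i hi => hsepcol i (by omega))]
  apply List.ext_getElem
  · rw [rrfold_len, List.length_map, List.length_range]
  intro r h1 h2
  have hr : r < grid.length := by rwa [rrfold_len] at h1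
  rw [List.getElem_map, List.getElem_range]
  rw [pv_getElem_eq_getD _ [] r h1]
  simp only [hrst r hr]
  by_cases hF : pvSepRowA grid (grid.getD 0 []).length r = true
  · simp only [hF, if_true]
    rw [List.map_id']
    apply List.ext_getElem
    · rw [rrfold_rowlen]
    · intro j hj1 hj2
      rw [pv_getElem_eq_getD _ 0 j hj1, pv_getElem_eq_getD _ 0 j hj2]
      show pvG _ r j = pvG grid r j
      apply rrfold_notouch
      intro rr hrr hcon
      have hfalse : pvSepRowA grid (grid.getD 0 []).length r = false :=
        pvRR_noF hrr r hcon.1 hcon.2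
      rw [hfalse] at hF
      simp at hF
  · have hF' : pvSepRowA grid (grid.getD 0 []).length r = false := by
      simpa using hF
    simp only [hF', Bool.false_eq_true, if_false]
    apply List.ext_getElem
    · rw [List.length_map, PySem.List.length_enumerate, rrfold_rowlen]
    · intro j hj1 hj2
      have hjrow : j < (grid.getD r []).length := by
        rwa [List.length_map, PySem.List.length_enumerate] at hj2
      rw [List.getElem_map]
      simp only [PySem.List.getElem_enumerate, zero_add]
      have hrowj : (grid.getD r [])[j]'hjrow = pvG grid r j := pv_getElem_eq_getD _ 0 j hjrow
      rw [pv_getElem_eq_getD _ 0 j hj1]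
      simp only [hrowj, Int.toNat_natCast, Nat.cast_lt]
      by_cases hjw : j < (grid.getD 0 []).length
      · rw [if_pos hjw]
        simp only [hcst j hjw]
        by_cases hG : pvSepColA grid grid.length j = true
        · simp only [hG, if_true]
          show pvG _ r j = pvG grid r j
          apply rrfold_notouch_c
          intro cc hcc hcon
          have hfalse : pvSepColA grid grid.length j = false :=
            pvRR_noF hcc j hcon.1 hcon.2
          rw [hfalse] at hG
          simp at hG
        · have hG' : pvSepColA grid grid.length j = false := by simpa using hG
          simp only [hG', Bool.false_eq_true, if_false]
          obtain ⟨RI, hRI, hRIc⟩ := pvRR_cover (F := fun r => pvSepRowA grid (grid.getD 0 []).length r)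
            (n := grid.length) hr hF'
          obtain ⟨CI, hCI, hCIc⟩ := pvRR_cover (F := fun c => pvSepColA grid grid.length c)
            (n := (grid.getD 0 []).length) hjw hG'
          have hbsr : pvBS (fun r => pvSepRowA grid (grid.getD 0 []).length r) r = RI.1 :=
            pvRR_start hRI hRIc.1 hRIc.2
          have hbsc : pvBS (fun c => pvSepColA grid grid.length c) j = CI.1 :=
            pvRR_start hCI hCIc.1 hCIc.2
          rw [hbsr, hbsc]
          show pvG _ r j = _
          rw [rrfold_hit grid (fun r => pvSepRowA grid (grid.getD 0 []).length r)
            (fun c => pvSepColA grid grid.length c) grid.length (grid.getD 0 []).length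
            RI CI hRI hCI r j hRIc hCIc hr hjrow]
          rw [first_get_eq_center grid grid.length (grid.getD 0 []).length
            (fun r => pvSepRowA grid (grid.getD 0 []).length r)
            (fun c => pvSepColA grid grid.length c) _ _ hrst hcst RI CI hRI hCI]
          rw [pvCenterA_eq_find grid RI.1 RI.2 CI.1 CI.2]
          cases hopt : (pvRect RI.1 RI.2 CI.1 CI.2).find? (pvQ grid) with
          | none =>
            simp
          | some x =>
            have hq := List.find?_some hopt
            have hx0 : pvG grid x.1 x.2 ≠ 0 := by
              rw [pvQ] at hq
              intro hz
              rw [hz] at hq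
              simp at hq
            simp only [Option.map_some, Option.getD_some]
            by_cases h5 : pvG grid r j = 5
            · rw [if_neg (by tauto)]
              simp [h5]
            · rw [if_pos ⟨hx0, h5⟩]
              simp [h5]
      · rw [if_neg hjw]
        show pvG _ r j = pvG grid r j
        apply rrfold_notouch_c
        intro cc hcc hcon
        have := pvRR_bounds hcc
        omega

-- ===== VERDICT (by name: the statement is the Claim_ definition above) =====
theorem solve_54d9e175_spec : Claim_equal_solve_54d9e175 := by
  intro grid _ hpre
  rw [Spec_solve_54d9e175]
  exact main_eq grid hpre.1 hpre.2
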